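-- pv_equiv track=rewrite | github.com/jlapeyra/catalan-tokenizer | src/locucions.py | simplify_pos
-- ===== SOURCE A (Python) =====
-- def simplify_pos(loc_pos, pos_list):
--     if not pos_list:
--         return pos_list
--     for i in range(len(loc_pos), min(1, len(loc_pos)//2-1), -1):
--         ret = []
--         for pos_ in pos_list:
--             if pos_[:i] == loc_pos[:i]:
--                 ret.append(pos_)
--             if ret:
--                 return ret
--     return pos_list
-- ===== SOURCE B (Python) =====
-- def _cpl(a, b):
--     # length of the longest common prefix of a and b
--     if a and b and a[0] == b[0]:
--         return 1 + _cpl(a[1:], b[1:])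
--     return 0
--
--
-- def simplify_pos(loc_pos, pos_list):
--     if not pos_list:
--         return pos_list
--     lb = min(1, len(loc_pos) // 2 - 1)
--     best_c = -1
--     best = pos_list[0]
--     for pos_ in pos_list:
--         c = _cpl(pos_, loc_pos)
--         if c > best_c:
--             best_c = c
--             best = pos_
--     if best_c > lb:
--         return [best]
--     return pos_list
-- ===== Notes on version B (the rewrite author's own statement) =====
-- stated objective: faster
-- what changed: Replaces A's descent over prefix lengths (re-scanning the whole list and re-slicing both strings at each length) by a single pass that computes each element's common-prefix length with loc_pos once, keeping the first maximum; returns [best] iff that maximum exceeds lb = min(1, len(loc_pos)//2 - 1).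
import Mathlib
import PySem

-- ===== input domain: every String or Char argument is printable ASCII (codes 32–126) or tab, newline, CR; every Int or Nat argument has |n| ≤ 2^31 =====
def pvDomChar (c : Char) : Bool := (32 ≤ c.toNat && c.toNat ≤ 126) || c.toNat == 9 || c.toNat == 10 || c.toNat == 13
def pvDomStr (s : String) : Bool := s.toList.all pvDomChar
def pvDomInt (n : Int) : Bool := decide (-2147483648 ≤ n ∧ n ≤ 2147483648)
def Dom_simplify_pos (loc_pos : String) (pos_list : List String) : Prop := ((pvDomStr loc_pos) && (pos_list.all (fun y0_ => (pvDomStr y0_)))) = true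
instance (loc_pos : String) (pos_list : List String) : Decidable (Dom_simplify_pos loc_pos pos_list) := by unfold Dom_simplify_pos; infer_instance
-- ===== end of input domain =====

-- B replaces A's nested descent over prefix lengths by one pass keeping the first
-- element of maximal common-prefix length with loc_pos (measured faster; same return value).

-- ===== PORT A =====
-- inner 'for pos_ in pos_list' loop of A, carrying the 'ret' accumulator;
-- 'some r' is the early 'return ret', 'none' means the inner loop finished without returning.
-- The string slice equality 'pos_[:i] == loc_pos[:i]' is compared on the character lists (exact).
def pvInnerA (loc_pos : String) (i : Int) : List String → List String → Option (List String)
  | _ret, [] => none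
  | ret, pos_ :: rest =>
    let ret' := if PySem.List.slice pos_.toList none (some i)
                  = PySem.List.slice loc_pos.toList none (some i)
                then ret ++ [pos_] else ret
    if ret' ≠ [] then some ret' else pvInnerA loc_pos i ret' rest

-- outer 'for i in range(len(loc_pos), min(1, len(loc_pos)//2-1), -1)' loop of A
def pvOuterA (loc_pos : String) (pos_list : List String) : List Int → List String
  | [] => pos_list
  | i :: is =>
    match pvInnerA loc_pos i [] pos_list with
    | some r => r
    | none => pvOuterA loc_pos pos_list is

def simplify_pos (loc_pos : String) (pos_list : List String) : List String :=
  if pos_list = [] then pos_list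
  else
    pvOuterA loc_pos pos_list
      (PySem.List.pyRange (PySem.Str.len loc_pos)
        (min 1 (PySem.Int.floordiv (PySem.Str.len loc_pos) 2 - 1)) (-1))

-- ===== PORT B =====
-- _cpl of Source B: length of the longest common prefix (recursive)
def pvCpl : List Char → List Char → Int
  | a :: as, b :: bs => if a = b then 1 + pvCpl as bs else 0
  | _, _ => 0

def simplify_pos_alt (loc_pos : String) (pos_list : List String) : List String :=
  match pos_list with
  | [] => pos_list
  | p0 :: _ =>
    let lb : Int := min 1 (PySem.Int.floordiv (PySem.Str.len loc_pos) 2 - 1)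
    let r := pos_list.foldl
      (fun (acc : Int × String) pos_ =>
        let c := pvCpl pos_.toList loc_pos.toList
        if c > acc.1 then (c, pos_) else acc) (-1, p0)
    if r.1 > lb then [r.2] else pos_list

-- ===== PRECONDITION & SPEC =====
def Spec_simplify_pos (loc_pos : String) (pos_list : List String) (out : List String) : Prop := out = simplify_pos_alt loc_pos pos_list
instance (loc_pos : String) (pos_list : List String) (out : List String) : Decidable (Spec_simplify_pos loc_pos pos_list out) := by unfold Spec_simplify_pos; infer_instance

-- ===== CLAIM (what is proved, stated in full; the proofs are below) =====
def Claim_equal_simplify_pos : Prop := ∀ (loc_pos : String) (pos_list : List String), Dom_simplify_pos loc_pos pos_list → Spec_simplify_pos loc_pos pos_list (simplify_pos loc_pos pos_list)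

-- ===== LEMMAS AND PROOFS =====

-- B's fold step, named so the fold lemma and the port's lambda coincide (definitionally equal)
def pvStep (L : List Char) (acc : Int × String) (pos_ : String) : Int × String :=
  let c := pvCpl pos_.toList L
  if c > acc.1 then (c, pos_) else acc

theorem pvCpl_nonneg (a b : List Char) : 0 ≤ pvCpl a b := by
  induction a generalizing b with
  | nil => simp [pvCpl]
  | cons x xs ih =>
    cases b with
    | nil => simp [pvCpl]
    | cons y ys =>
      simp only [pvCpl]
      split
      · have := ih ys; omega
      · omega

theorem pvCpl_le_len (a b : List Char) : pvCpl a b ≤ (b.length : Int) := by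
  induction a generalizing b with
  | nil =>
    cases b with
    | nil => simp [pvCpl]
    | cons y ys => simp [pvCpl]; positivity
  | cons x xs ih =>
    cases b with
    | nil => simp [pvCpl]
    | cons y ys =>
      simp only [pvCpl, List.length_cons]
      split
      · have := ih ys; push_cast; omega
      · push_cast; positivity

-- prefix match of length i ↔ i ≤ common-prefix length (for 0 ≤ i ≤ |b|)
theorem pvMatch_iff (a b : List Char) (i : Int) (h0 : 0 ≤ i) (hn : i ≤ (b.length : Int)) :
    (a.take i.toNat = b.take i.toNat) ↔ i ≤ pvCpl a b := by
  induction a generalizing b i with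
  | nil =>
    cases b with
    | nil =>
      simp only [List.length_nil, Nat.cast_zero] at hn
      have : i = 0 := by omega
      simp [this, pvCpl]
    | cons y ys =>
      simp only [pvCpl, List.take_nil]
      constructor
      · intro h
        rcases List.take_eq_nil_iff.mp h.symm with h1 | h1
        · omega
        · simp at h1
      · intro h
        have : i = 0 := by omega
        simp [this]
  | cons x xs ih =>
    cases b with
    | nil =>
      simp only [List.length_nil, Nat.cast_zero] at hn
      have h2 : i = 0 := by omega
      simp [h2, pvCpl]
    | cons y ys =>
      by_cases hi : i = 0
      · have := pvCpl_nonneg (x :: xs) (y :: ys)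
        simp only [hi, Int.toNat_zero, List.take_zero, true_iff]
        omega
      · have h1 : i.toNat = (i - 1).toNat + 1 := by omega
        simp only [pvCpl, h1, List.take_succ_cons, List.cons.injEq]
        by_cases hxy : x = y
        · rw [if_pos hxy]
          rw [ih ys (i - 1) (by omega) (by simp only [List.length_cons] at hn; push_cast at hn ⊢; omega)]
          constructor
          · rintro ⟨_, h⟩; omega
          · intro h; exact ⟨hxy, by omega⟩
        · rw [if_neg hxy]
          constructor
          · rintro ⟨h, _⟩; exact absurd h hxy
          · intro h; omega

-- A's inner loop (started with ret = []) is find? of the prefix test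
theorem pvInnerA_eq_find (loc_pos : String) (i : Int) (ps : List String) :
    pvInnerA loc_pos i [] ps
      = (ps.find? (fun (p : String) => PySem.List.slice p.toList none (some i)
            = PySem.List.slice loc_pos.toList none (some i))).map (fun p => [p]) := by
  induction ps with
  | nil => simp [pvInnerA]
  | cons p rest ih =>
    simp only [pvInnerA, List.find?_cons]
    by_cases h : PySem.List.slice p.toList none (some i)
        = PySem.List.slice loc_pos.toList none (some i)
    · simp [h]
    · simp [h, ih]

-- B's fold: its first component bounds every common-prefix length, and when it was
-- improved past the seed, its second component is the first element attaining it
theorem pvFold_spec (L : List Char) (ps : List String) (b0 : Int) (x0 : String) :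
    b0 ≤ (ps.foldl (pvStep L) (b0, x0)).1 ∧
    (∀ p ∈ ps, pvCpl p.toList L ≤ (ps.foldl (pvStep L) (b0, x0)).1) ∧
      (ps.foldl (pvStep L) (b0, x0) = (b0, x0) ∨
        (b0 < (ps.foldl (pvStep L) (b0, x0)).1 ∧
         pvCpl (ps.foldl (pvStep L) (b0, x0)).2.toList L = (ps.foldl (pvStep L) (b0, x0)).1 ∧
         ps.find? (fun (p : String) => decide ((ps.foldl (pvStep L) (b0, x0)).1 ≤ pvCpl p.toList L)) =
           some (ps.foldl (pvStep L) (b0, x0)).2)) := by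
  induction ps generalizing b0 x0 with
  | nil => simp
  | cons p rest ih =>
    simp only [List.foldl_cons, List.mem_cons]
    by_cases h : pvCpl p.toList L > b0
    · simp only [show pvStep L (b0, x0) p = (pvCpl p.toList L, p) from by simp [pvStep]; omega]
      obtain ⟨h1, h2, h3⟩ := ih (pvCpl p.toList L) p
      refine ⟨by omega, ?_, ?_⟩
      · rintro q (rfl | hq)
        · exact h1
        · exact h2 q hq
      · right
        rcases h3 with heq | ⟨hlt, hcpl, hfind⟩
        · rw [heq]
          refine ⟨h, rfl, ?_⟩
          rw [List.find?_cons_of_pos (h := by simp)]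
        · refine ⟨by omega, hcpl, ?_⟩
          rw [List.find?_cons_of_neg (h := by simp; omega)]
          exact hfind
    · simp only [show pvStep L (b0, x0) p = (b0, x0) from by simp [pvStep]; omega]
      obtain ⟨h1, h2, h3⟩ := ih b0 x0
      refine ⟨h1, ?_, ?_⟩
      · rintro q (rfl | hq)
        · omega
        · exact h2 q hq
      · rcases h3 with heq | ⟨hlt, hcpl, hfind⟩
        · left; exact heq
        · right
          refine ⟨hlt, hcpl, ?_⟩
          rw [List.find?_cons_of_neg (h := by simp; omega)]
          exact hfind

-- A's outer loop, descending from a (≤ |loc_pos|) to lb exclusive, when bc bounds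
-- every common-prefix length and best is the first element attaining bc
theorem pvOuterA_run (loc_pos : String) (ps : List String) (lb bc : Int) (best : String)
    (hbn : bc ≤ (loc_pos.toList.length : Int))
    (hub : ∀ p ∈ ps, pvCpl p.toList loc_pos.toList ≤ bc)
    (hbest : lb < bc →
      ps.find? (fun (p : String) => decide (bc ≤ pvCpl p.toList loc_pos.toList)) = some best)
    (hlb : -1 ≤ lb) :
    ∀ (k : Nat) (a : Int), (a - lb).toNat ≤ k → bc ≤ a → a ≤ (loc_pos.toList.length : Int) →
      pvOuterA loc_pos ps (PySem.List.pyRange a lb (-1))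
        = if lb < bc then [best] else ps := by
  intro k
  induction k with
  | zero =>
    intro a hk ha han
    have hale : a ≤ lb := by omega
    rw [PySem.List.pyRange_neg_one_eq_nil hale]
    simp only [pvOuterA]
    have : ¬ lb < bc := by omega
    simp [this]
  | succ k ih =>
    intro a hk ha han
    by_cases hale : a ≤ lb
    · rw [PySem.List.pyRange_neg_one_eq_nil hale]
      simp only [pvOuterA]
      have : ¬ lb < bc := by omega
      simp [this]
    · have hla : lb < a := by omega
      rw [PySem.List.pyRange_neg_one_cons (by omega)]
      simp only [pvOuterA]
      have ha0 : 0 ≤ a := by omega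
      rw [pvInnerA_eq_find]
      by_cases hab : a = bc
      · -- first hit: i = bc, the first matching element is best
        subst hab
        have hfind := hbest hla
        have hpred : (fun (p : String) => decide (PySem.List.slice p.toList none (some a)
              = PySem.List.slice loc_pos.toList none (some a)))
            = (fun (p : String) => decide (a ≤ pvCpl p.toList loc_pos.toList)) := by
          funext p
          simp only [decide_eq_decide]
          rw [PySem.List.slice_to _ ha0, PySem.List.slice_to _ ha0]
          exact pvMatch_iff p.toList loc_pos.toList a ha0 hbn
        rw [show (fun (p : String) => decide (PySem.List.slice p.toList none (some a)
              = PySem.List.slice loc_pos.toList none (some a)))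
            = (fun (p : String) => decide (a ≤ pvCpl p.toList loc_pos.toList)) from hpred]
        rw [hfind]
        simp [hla]
      · -- no element matches at length a > bc
        have hbclt : bc < a := by omega
        have hnone : ps.find? (fun (p : String) => decide (PySem.List.slice p.toList none (some a)
              = PySem.List.slice loc_pos.toList none (some a))) = none := by
          rw [List.find?_eq_none]
          intro p hp
          simp only [decide_eq_true_eq]
          intro hcontra
          rw [PySem.List.slice_to _ ha0, PySem.List.slice_to _ ha0] at hcontra
          have := (pvMatch_iff p.toList loc_pos.toList a ha0 han).mp hcontra
          have := hub p hp
          omega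
        rw [hnone]
        simp only [Option.map_none]
        exact ih (a - 1) (by omega) (by omega) (by omega)

-- ===== VERDICT (by name: the statement is the Claim_ definition above) =====
theorem simplify_pos_spec : Claim_equal_simplify_pos := by
  unfold Claim_equal_simplify_pos
  intro loc_pos pos_list _hdom
  unfold Spec_simplify_pos
  cases pos_list with
  | nil => simp [simplify_pos, simplify_pos_alt]
  | cons p0 rest =>
    simp only [simplify_pos, simplify_pos_alt]
    rw [if_neg (by simp : ¬ (p0 :: rest : List String) = [])]
    have hstep : (fun (acc : Int × String) pos_ =>
        let c := pvCpl pos_.toList loc_pos.toList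
        if c > acc.1 then (c, pos_) else acc) = pvStep loc_pos.toList := rfl
    rw [hstep]
    set n : Int := (loc_pos.toList.length : Int) with hn
    have hlen : PySem.Str.len loc_pos = n := by simp [hn]
    set lb : Int := min 1 (PySem.Int.floordiv (PySem.Str.len loc_pos) 2 - 1) with hlb
    have hlbm1 : -1 ≤ lb := by
      rw [hlb, hlen, hn, PySem.Int.floordiv_eq_ediv_of_pos (by omega)]
      have : (0:Int) ≤ (loc_pos.toList.length : Int) / 2 :=
        Int.ediv_nonneg (by positivity) (by omega)
      omega
    obtain ⟨h1, h2, h3⟩ := pvFold_spec loc_pos.toList (p0 :: rest) (-1) p0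
    set r := (p0 :: rest).foldl (pvStep loc_pos.toList) (-1, p0) with hr
    have hbn : r.1 ≤ n := by
      rcases h3 with heq | ⟨_, hcpl, _⟩
      · rw [heq, hn]; omega
      · rw [← hcpl, hn]; exact pvCpl_le_len _ _
    have hbest : lb < r.1 →
        (p0 :: rest).find? (fun (p : String) => decide (r.1 ≤ pvCpl p.toList loc_pos.toList))
          = some r.2 := by
      intro hlt
      rcases h3 with heq | ⟨_, _, hfind⟩
      · rw [heq] at hlt ⊢; omega
      · exact hfind
    have hrun := pvOuterA_run loc_pos (p0 :: rest) lb r.1 r.2 hbn h2 hbest hlbm1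
      (n - lb).toNat n (le_refl _) hbn (le_refl _)
    rw [hlen, hrun]
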